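-- pv_equiv track=rewrite | github.com/mathelai/github.io | imo2012p3/simulation.py | binary_search_strategy
-- ===== SOURCE A (Python) =====
-- from typing import List, Set, Tuple, Dict, Any
--
-- def binary_search_strategy(k: int, N: int) -> Tuple[List[Set[int]], int]:
--     """
--     Implement Player B's binary search strategy.
--
--     This strategy works when n ≥ 2^k. The idea is to use a binary search
--     approach that handles potential lies.
--
--     Returns:
--         (questions, max_final_set_size): The questions to ask and the maximum final set size needed
--     """
--     questions = []
--
--     # For simplicity, we'll use a halving strategy
--     # We need to narrow down from N possibilities to at most 2^k
--
--     # Number of questions needed: we ask about lower/upper halves repeatedly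
--     # After each question, we can eliminate some possibilities
--     # The strategy is to ask log2(N/2^k) * (k+1) questions to be safe
--
--     current_range = set(range(1, N + 1))
--     questions_to_ask = []
--
--     # Simple halving: split the range in half repeatedly
--     while len(current_range) > 1:
--         sorted_range = sorted(current_range)
--         mid = len(sorted_range) // 2
--         lower_half = set(sorted_range[:mid])
--
--         if lower_half:
--             questions_to_ask.append(lower_half)
--             current_range = lower_half if len(lower_half) > 1 else set(sorted_range[mid:])
--         else:
--             break
--
--     return questions_to_ask, 2 ** k
-- ===== SOURCE B (Python) =====
-- def binary_search_strategy(k, N):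
--     # Track the remaining candidates as an interval [lo, hi): halve it in place,
--     # asking about the lower half each round, until one candidate remains.
--     questions = []
--     lo, hi = 1, N + 1
--     while hi - lo > 1:
--         mid = lo + (hi - lo) // 2
--         questions.append(set(range(lo, mid)))
--         if mid - lo > 1:
--             hi = mid
--         else:
--             lo = mid
--     return questions, 2 ** k
-- ===== Notes on version B (the rewrite author's own statement) =====
-- stated objective: faster
-- what changed: B tracks the remaining candidates as interval endpoints (lo, hi) and halves them arithmetically, emitting each question as set(range(lo, mid)), eliminating A's per-round materialisation and O(n log n) sorting of the whole remaining set. Pre_ excludes k < 0, where Python's 2 ** k is a float rather than an int.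
-- outside the precondition, e.g. on binary_search_strategy(-1, 4): A returns ([{1, 2}, {1}], 0.5), B returns ([{1, 2}, {1}], 0.5)
import Mathlib
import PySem

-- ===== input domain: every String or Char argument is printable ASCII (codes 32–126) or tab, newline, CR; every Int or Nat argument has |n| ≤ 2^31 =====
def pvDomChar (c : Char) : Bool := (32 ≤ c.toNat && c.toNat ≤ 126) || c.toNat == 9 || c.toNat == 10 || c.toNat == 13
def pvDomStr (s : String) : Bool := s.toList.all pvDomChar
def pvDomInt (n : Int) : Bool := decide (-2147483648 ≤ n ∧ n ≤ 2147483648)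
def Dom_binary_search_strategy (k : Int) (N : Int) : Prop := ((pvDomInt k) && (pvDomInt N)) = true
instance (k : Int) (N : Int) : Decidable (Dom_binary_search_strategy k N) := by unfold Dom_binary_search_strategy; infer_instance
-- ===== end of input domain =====

-- B keeps the remaining candidates as interval endpoints and halves them arithmetically,
-- removing A's per-round set materialisation and sorting (objective: faster).

-- ===== PORT A =====
-- the while-loop of A: questions_to_ask is qs, current_range is cur
def pvALoop (qs : List (List Int)) (cur : List Int) : List (List Int) :=
  if 1 < cur.length then
    let sr := PySem.List.sorted cur (fun x => x) false
    -- mid = len(sorted_range)//2 : a Nat division on the nonnegative length, exact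
    let mid : Nat := sr.length / 2
    -- sorted_range[:mid] with 0 ≤ mid ≤ len is take mid; sorted_range[mid:] is drop mid
    let lower : PySem.Set Int := PySem.Set.ofList (sr.take mid)
    if lower.length ≠ 0 then
      if 1 < lower.length then pvALoop (qs ++ [lower]) lower
      else pvALoop (qs ++ [lower]) (PySem.Set.ofList (sr.drop mid))
    else qs
  else qs
termination_by cur.length
decreasing_by
  · have h1 := PySem.Set.length_ofList_le ((PySem.List.sorted cur (fun x => x) false).take
      ((PySem.List.sorted cur (fun x => x) false).length / 2))
    have h2 : (PySem.List.sorted cur (fun x => x) false).length = cur.length :=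
      PySem.List.length_sorted ..
    simp only [List.length_take] at h1
    omega
  · have h1 := PySem.Set.length_ofList_le ((PySem.List.sorted cur (fun x => x) false).drop
      ((PySem.List.sorted cur (fun x => x) false).length / 2))
    have h2 : (PySem.List.sorted cur (fun x => x) false).length = cur.length :=
      PySem.List.length_sorted ..
    simp only [List.length_drop] at h1
    omega

def binary_search_strategy (k : Int) (N : Int) : List (List Int) × Int :=
  -- current_range = set(range(1, N + 1)); 2 ** k ported as 2 ^ k.toNat, exact for 0 ≤ k (Pre_)
  (pvALoop [] (PySem.Set.ofList (PySem.List.pyRange 1 (N + 1) 1)), (2 : Int) ^ k.toNat)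

-- ===== PORT B =====
-- the while-loop of B: questions is qs, the interval endpoints are lo, hi
def pvBLoop (qs : List (List Int)) (lo hi : Int) : List (List Int) :=
  if 1 < hi - lo then
    let mid := lo + PySem.Int.floordiv (hi - lo) 2
    let q : PySem.Set Int := PySem.Set.ofList (PySem.List.pyRange lo mid 1)
    if 1 < mid - lo then pvBLoop (qs ++ [q]) lo mid
    else pvBLoop (qs ++ [q]) mid hi
  else qs
termination_by (hi - lo).toNat
decreasing_by
  all_goals
  · have hh : PySem.Int.floordiv (hi - lo) 2 = (hi - lo) / 2 := by
      simp only [PySem.Int.floordiv]; exact Int.fdiv_eq_ediv_of_nonneg _ (by omega)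
    rw [hh] at *; omega

def binary_search_strategy_alt (k : Int) (N : Int) : List (List Int) × Int :=
  -- lo, hi = 1, N + 1; 2 ** k ported as 2 ^ k.toNat, exact for 0 ≤ k (Pre_)
  (pvBLoop [] 1 (N + 1), (2 : Int) ^ k.toNat)

-- ===== PRECONDITION & SPEC =====
-- Pre_ excludes k < 0, where Python's 2 ** k is a float (e.g. 0.5), not a value of the declared int return type.
def Pre_binary_search_strategy (k : Int) (N : Int) : Prop := 0 ≤ k
instance (k : Int) (N : Int) : Decidable (Pre_binary_search_strategy k N) := by
  unfold Pre_binary_search_strategy; infer_instance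

def pvWitness_binary_search_strategy : Int × Int := (2, 7)

def Spec_binary_search_strategy (k : Int) (N : Int) (out : List (List Int) × Int) : Prop :=
  out = binary_search_strategy_alt k N
instance (k : Int) (N : Int) (out : List (List Int) × Int) :
    Decidable (Spec_binary_search_strategy k N out) := by
  unfold Spec_binary_search_strategy; infer_instance

-- ===== CLAIM (what is proved, stated in full; the proofs are below) =====
def Claim_equal_binary_search_strategy : Prop :=
  ∀ (k : Int) (N : Int), Dom_binary_search_strategy k N →
    Pre_binary_search_strategy k N →
    Spec_binary_search_strategy k N (binary_search_strategy k N)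

-- ===== LEMMAS AND PROOFS =====

-- an already-sorted range
theorem pvSortedRng (a b : Int) :
    PySem.List.sorted (PySem.List.pyRange a b 1) (fun x => x) false =
      PySem.List.pyRange a b 1 :=
  PySem.List.sorted_eq_self_of_pairwise _ _
    ((PySem.List.pairwise_lt_pyRange_one a b).imp le_of_lt)

-- A's loop stops on a range of length ≤ 1
theorem pvBaseA (a b : Int) (qs : List (List Int)) (h : b ≤ a + 1) :
    pvALoop qs (PySem.List.pyRange a b 1) = qs := by
  rw [pvALoop]
  have : (PySem.List.pyRange a b 1).length = (b - a).toNat :=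
    PySem.List.length_pyRange_one a b
  simp [this, show ¬ (1 < (b - a).toNat) by omega]

-- one iteration of A's loop on a contiguous range [a, b)
theorem pvStepA (a b : Int) (qs : List (List Int)) (h : a + 2 ≤ b) :
    pvALoop qs (PySem.List.pyRange a b 1) =
      (if 1 < (b - a).toNat / 2 then
        pvALoop (qs ++ [PySem.List.pyRange a (a + ((b - a).toNat / 2 : Nat)) 1])
          (PySem.List.pyRange a (a + ((b - a).toNat / 2 : Nat)) 1)
      else
        pvALoop (qs ++ [PySem.List.pyRange a (a + ((b - a).toNat / 2 : Nat)) 1])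
          (PySem.List.pyRange (a + ((b - a).toNat / 2 : Nat)) b 1)) := by
  have hlen : (PySem.List.pyRange a b 1).length = (b - a).toNat :=
    PySem.List.length_pyRange_one a b
  set n : Nat := (b - a).toNat with hn
  set mid : Nat := n / 2 with hmid
  have hsplit : PySem.List.pyRange a b 1 =
      PySem.List.pyRange a (a + (mid : Int)) 1 ++ PySem.List.pyRange (a + (mid : Int)) b 1 :=
    PySem.List.pyRange_one_append a (a + (mid : Int)) b (by omega) (by omega)
  have hlow : (PySem.List.pyRange a (a + (mid : Int)) 1).length = mid := by
    rw [PySem.List.length_pyRange_one]; omega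
  have htake : (PySem.List.pyRange a b 1).take mid = PySem.List.pyRange a (a + (mid : Int)) 1 := by
    rw [hsplit, List.take_left' hlow]
  have hdrop : (PySem.List.pyRange a b 1).drop mid = PySem.List.pyRange (a + (mid : Int)) b 1 := by
    rw [hsplit, List.drop_left' hlow]
  rw [pvALoop]
  have h2 : 1 < n := by omega
  simp only [hlen, pvSortedRng, ← hmid, htake, hdrop,
    PySem.Set.ofList_eq_self_of_nodup _ (PySem.List.nodup_pyRange_one a (a + (mid : Int))),
    PySem.Set.ofList_eq_self_of_nodup _ (PySem.List.nodup_pyRange_one (a + (mid : Int)) b),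
    hlow]
  simp [h2]
  intro hmid0
  exact absurd hmid0 (by omega)

-- one iteration of B's loop, with the floor division simplified
theorem pvStepB (lo hi : Int) (qs : List (List Int)) (h : lo + 2 ≤ hi) :
    pvBLoop qs lo hi =
      (if 1 < (hi - lo) / 2 then
        pvBLoop (qs ++ [PySem.Set.ofList (PySem.List.pyRange lo (lo + (hi - lo) / 2) 1)])
          lo (lo + (hi - lo) / 2)
      else
        pvBLoop (qs ++ [PySem.Set.ofList (PySem.List.pyRange lo (lo + (hi - lo) / 2) 1)])
          (lo + (hi - lo) / 2) hi) := by
  rw [pvBLoop]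
  have hh : PySem.Int.floordiv (hi - lo) 2 = (hi - lo) / 2 := by
    simp only [PySem.Int.floordiv]; exact Int.fdiv_eq_ediv_of_nonneg _ (by omega)
  simp only [hh, show (1 : Int) < hi - lo by omega, if_true]
  have : lo + (hi - lo) / 2 - lo = (hi - lo) / 2 := by ring
  rw [this]

theorem pvBLoopNil (lo hi : Int) (qs : List (List Int)) (h : hi ≤ lo + 1) :
    pvBLoop qs lo hi = qs := by
  rw [pvBLoop]; simp [show ¬ 1 < hi - lo by omega]

-- A's loop on the range [lo, hi) equals B's interval loop
theorem pvMain (n : Nat) (lo hi : Int) (qs : List (List Int)) (hn : (hi - lo).toNat = n) :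
    pvALoop qs (PySem.List.pyRange lo hi 1) = pvBLoop qs lo hi := by
  induction n using Nat.strong_induction_on generalizing lo hi qs with
  | _ n ih =>
    by_cases h1 : hi ≤ lo + 1
    · rw [pvBaseA lo hi qs h1, pvBLoopNil lo hi qs h1]
    · rw [not_le] at h1
      have h2 : lo + 2 ≤ hi := by omega
      rw [pvStepA lo hi qs h2, pvStepB lo hi qs h2]
      have hc : ((hi - lo).toNat / 2 : Nat) = ((hi - lo) / 2 : Int) := by omega
      have hnodup := PySem.List.nodup_pyRange_one lo (lo + (hi - lo) / 2)
      rw [hc]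
      by_cases hm : (1 : Int) < (hi - lo) / 2
      · rw [if_pos (by omega : 1 < ((hi - lo).toNat / 2 : Nat)), if_pos hm,
          PySem.Set.ofList_eq_self_of_nodup _ hnodup,
          ih ((lo + (hi - lo) / 2) - lo).toNat (by omega) _ _ _ rfl]
      · rw [if_neg (by omega : ¬ 1 < ((hi - lo).toNat / 2 : Nat)), if_neg hm,
          PySem.Set.ofList_eq_self_of_nodup _ hnodup,
          ih (hi - (lo + (hi - lo) / 2)).toNat (by omega) _ _ _ rfl]

-- ===== VERDICT =====
theorem binary_search_strategy_spec : Claim_equal_binary_search_strategy := by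
  intro k N _ _
  unfold Spec_binary_search_strategy binary_search_strategy binary_search_strategy_alt
  rw [PySem.Set.ofList_eq_self_of_nodup _ (PySem.List.nodup_pyRange_one 1 (N + 1))]
  rw [pvMain (N + 1 - 1).toNat 1 (N + 1) [] rfl]
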